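-- pv_equiv track=rewrite | github.com/HariDevloper/SEO-Dashboard-AI | backend/analyzer.py | check_heading_hierarchy
-- ===== SOURCE A (Python) =====
-- def check_heading_hierarchy(headings):
--     """Check if heading hierarchy is valid (no skipped levels)"""
--     levels = []
--     for level in ['h1', 'h2', 'h3', 'h4', 'h5', 'h6']:
--         if headings.get(level):
--             levels.append(int(level[1]))
--
--     if not levels:
--         return False
--
--     # Check for skipped levels
--     for i in range(len(levels) - 1):
--         if levels[i + 1] - levels[i] > 1:
--             return False
--
--     return True
-- ===== SOURCE B (Python) =====
-- def check_heading_hierarchy(headings):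
--     """Check if heading hierarchy is valid (no skipped levels)"""
--     levels = [int(level[1]) for level in ['h1', 'h2', 'h3', 'h4', 'h5', 'h6']
--               if headings.get(level)]
--     if not levels:
--         return False
--     # present levels form one contiguous range <=> no skipped levels
--     return max(levels) - min(levels) + 1 == len(levels)
-- ===== Notes on version B (the rewrite author's own statement) =====
-- stated objective: simpler
-- what changed: Replaced the pairwise adjacent-difference scan with a single contiguity test: the present levels are valid iff max-min+1 equals their count.
import Mathlib
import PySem

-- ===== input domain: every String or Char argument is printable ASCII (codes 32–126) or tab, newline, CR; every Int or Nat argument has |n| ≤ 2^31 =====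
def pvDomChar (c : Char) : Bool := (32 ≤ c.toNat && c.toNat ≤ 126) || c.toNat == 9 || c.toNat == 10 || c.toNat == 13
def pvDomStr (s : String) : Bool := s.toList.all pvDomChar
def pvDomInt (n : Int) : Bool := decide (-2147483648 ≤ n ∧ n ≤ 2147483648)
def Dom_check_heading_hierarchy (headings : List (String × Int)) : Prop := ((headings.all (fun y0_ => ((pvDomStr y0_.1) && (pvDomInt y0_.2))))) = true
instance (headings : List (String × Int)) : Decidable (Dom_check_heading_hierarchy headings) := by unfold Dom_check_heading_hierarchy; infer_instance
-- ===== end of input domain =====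

-- B replaces the pairwise adjacent-difference scan with a max-min+1 == count contiguity test (simpler).


-- ===== PORT A =====
-- truthiness of headings.get(level): present with a nonzero value
def chhTruthy (headings : List (String × Int)) (k : String) : Bool :=
  match (PySem.Dict.mk headings).get? k with
  | some v => v != 0
  | none => false

-- int(level[1]) on the literal tags 'h1'..'h6'; the defaults are unreachable there
def chhDigit (level : String) : Int :=
  match PySem.Str.pyGet? level 1 with
  | some c => (PySem.Int.ofStr? (String.ofList [c])).getD 0
  | none => 0

def chhCollect (headings : List (String × Int)) : List Int :=
  ["h1", "h2", "h3", "h4", "h5", "h6"].foldl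
    (fun levels level => if chhTruthy headings level then levels ++ [chhDigit level] else levels) []

def check_heading_hierarchy (headings : List (String × Int)) : Bool :=
  let levels := chhCollect headings
  if levels = [] then false
  else
    -- for i in range(len(levels)-1): if levels[i+1]-levels[i] > 1: return False
    (PySem.List.pyRange 0 ((levels.length : Int) - 1) 1).all
      (fun i => !(PySem.List.pyGetD levels (i + 1) 0 - PySem.List.pyGetD levels i 0 > 1))

-- ===== PORT B =====
def chhCollectB (headings : List (String × Int)) : List Int :=
  (["h1", "h2", "h3", "h4", "h5", "h6"].filter (fun level => chhTruthy headings level)).map chhDigit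

def check_heading_hierarchy_alt (headings : List (String × Int)) : Bool :=
  let levels := chhCollectB headings
  if levels = [] then false
  else
    match PySem.List.max? levels (fun x => x), PySem.List.min? levels (fun x => x) with
    | some mx, some mn => mx - mn + 1 == (levels.length : Int)
    | _, _ => false


-- ===== PRECONDITION & SPEC =====
def Spec_check_heading_hierarchy (headings : List (String × Int)) (out : Bool) : Prop := out = check_heading_hierarchy_alt headings
instance (headings : List (String × Int)) (out : Bool) : Decidable (Spec_check_heading_hierarchy headings out) := by unfold Spec_check_heading_hierarchy; infer_instance

-- ===== CLAIM (what is proved, stated in full; the proofs are below) =====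
def Claim_equal_check_heading_hierarchy : Prop := ∀ (headings : List (String × Int)), Dom_check_heading_hierarchy headings → Spec_check_heading_hierarchy headings (check_heading_hierarchy headings)

-- ===== LEMMAS AND PROOFS =====

-- ===== VERDICT (by name: the statement is the Claim_ definition above) =====
theorem check_heading_hierarchy_spec : Claim_equal_check_heading_hierarchy := by
  intro headings _
  unfold Spec_check_heading_hierarchy
  simp only [check_heading_hierarchy, check_heading_hierarchy_alt, chhCollect, chhCollectB,
    List.foldl, List.filter]
  generalize chhTruthy headings "h1" = b1
  generalize chhTruthy headings "h2" = b2
  generalize chhTruthy headings "h3" = b3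
  generalize chhTruthy headings "h4" = b4
  generalize chhTruthy headings "h5" = b5
  generalize chhTruthy headings "h6" = b6
  revert b1 b2 b3 b4 b5 b6
  decide
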